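-- pv_equiv track=rewrite | github.com/Quantumgame/quantum-ml | ndot/lib/dot_classifier.py | get_dot_info
-- ===== SOURCE A (Python) =====
-- def get_dot_info(mask):
--     '''
--     Input:
--         mask : mask as described in the get_mask function
--     Output:
--         dot_info : (Dictonary) key = dot_number, value = [dot_begin, dot_end]
--     '''
--     # CHEAP TESTING SOLUTION
--     #dot_info = {0 : [1,1]}
--     #dot_info = {0: [1,1]}
--
--     dot_info = {}
--     n_dot = 0
--     index = 0
--     while(index < len(mask)):
--         try:
--             index = index + mask[index:].index('d')
--             dot_begin = index
--             index = index + mask[index:].index('b')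
--             dot_end = index - 1
--             dot_info[n_dot] = [dot_begin,dot_end]
--             n_dot += 1
--         # an axception is raised when no 'd' exists
--         except ValueError:
--             break
--
--     return dot_info
-- ===== SOURCE B (Python) =====
-- def get_dot_info(mask):
--     dot_info = {}
--     n_dot = 0
--     dot_begin = None
--     for i, s in enumerate(mask):
--         if dot_begin is None:
--             if s == 'd':
--                 dot_begin = i
--         elif s == 'b':
--             dot_info[n_dot] = [dot_begin, i - 1]
--             n_dot += 1
--             dot_begin = None
--     return dot_info
-- ===== Notes on version B (the rewrite author's own statement) =====
-- stated objective: alternative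
-- what changed: Replaced the while-loop doing repeated list slicing plus .index scans with a single linear pass over enumerate(mask) driven by a dot_begin state variable.
import Mathlib
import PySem

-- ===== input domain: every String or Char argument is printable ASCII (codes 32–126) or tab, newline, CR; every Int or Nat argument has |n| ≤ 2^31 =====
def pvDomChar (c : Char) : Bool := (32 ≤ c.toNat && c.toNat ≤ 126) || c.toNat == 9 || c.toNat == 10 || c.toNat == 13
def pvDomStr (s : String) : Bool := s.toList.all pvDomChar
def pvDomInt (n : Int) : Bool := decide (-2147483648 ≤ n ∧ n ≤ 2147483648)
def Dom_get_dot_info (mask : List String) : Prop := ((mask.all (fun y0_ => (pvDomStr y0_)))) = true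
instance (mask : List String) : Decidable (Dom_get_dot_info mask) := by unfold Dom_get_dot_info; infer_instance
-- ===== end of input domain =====

-- B replaces A's while-loop of slice-and-.index scans with a single linear pass state machine over enumerate(mask).


-- ===== PORT A =====
-- the while loop: index advances by the two `.index` results each iteration; on a failed
-- lookup (`index?` = none, Python's ValueError) the loop breaks and returns the dict so far.
-- `fuel` only makes the recursion structural; `fuel = mask.length + 1` always suffices
-- (each iteration moves `index` strictly forward), so the 0-fuel branch is never the result.
def aLoop (mask : List String) (fuel index : Nat) (n_dot : Int)
    (acc : List (Int × List Int)) : List (Int × List Int) :=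
  match fuel with
  | 0 => acc
  | fuel + 1 =>
    if index < mask.length then
      match PySem.List.index? (PySem.List.slice mask (some (index : Int)) none) "d" with
      | none => acc
      | some j =>
        -- dot_begin = index + j, inlined
        match PySem.List.index? (PySem.List.slice mask (some ((index + j : Nat) : Int)) none) "b" with
        | none => acc
        | some k =>
          aLoop mask fuel (index + j + k) (n_dot + 1)
            (acc ++ [(n_dot, [((index + j : Nat) : Int), ((index + j + k : Nat) : Int) - 1])])
    else acc

def get_dot_info (mask : List String) : List (Int × List Int) :=
  aLoop mask (mask.length + 1) 0 0 []

-- ===== PORT B =====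
-- one step of the for-loop body: state = (dot_begin (None ↔ outside a dot), n_dot, dot_info)
def altStep (st : Option Int × Int × List (Int × List Int)) (p : Int × String) :
    Option Int × Int × List (Int × List Int) :=
  match st with
  | (none, n, acc) => if p.2 = "d" then (some p.1, n, acc) else (none, n, acc)
  | (some db, n, acc) =>
      if p.2 = "b" then (none, n + 1, acc ++ [(n, [db, p.1 - 1])]) else (some db, n, acc)

def get_dot_info_alt (mask : List String) : List (Int × List Int) :=
  ((PySem.List.enumerate mask 0).foldl altStep (none, 0, [])).2.2

-- ===== PRECONDITION & SPEC =====
def Spec_get_dot_info (mask : List String) (out : List (Int × List Int)) : Prop := out = get_dot_info_alt mask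
instance (mask : List String) (out : List (Int × List Int)) : Decidable (Spec_get_dot_info mask out) := by unfold Spec_get_dot_info; infer_instance

-- ===== CLAIM (what is proved, stated in full; the proofs are below) =====
def Claim_equal_get_dot_info : Prop := ∀ (mask : List String), Dom_get_dot_info mask → Spec_get_dot_info mask (get_dot_info mask)

-- ===== LEMMAS AND PROOFS =====

-- reference state machine, proved equal to both ports:
-- refD scans for the opening "d", refB (inside a dot started at db) scans for the closing "b"
mutual
def refD : List String → Nat → Int → List (Int × List Int)
  | [], _, _ => []
  | s :: t, i, n => if s = "d" then refB t (i + 1) i n else refD t (i + 1) n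
def refB : List String → Nat → Nat → Int → List (Int × List Int)
  | [], _, _, _ => []
  | s :: t, i, db, n =>
      if s = "b" then (n, [(db : Int), (i : Int) - 1]) :: refD t (i + 1) (n + 1)
      else refB t (i + 1) db n
end

theorem refD_skip (pre l : List String) (i : Nat) (n : Int) (hpre : "d" ∉ pre) :
    refD (pre ++ l) i n = refD l (i + pre.length) n := by
  induction pre generalizing i with
  | nil => simp
  | cons s t ih =>
    simp only [List.mem_cons, not_or] at hpre
    simp only [List.cons_append, refD, if_neg (Ne.symm hpre.1), ih _ hpre.2]
    congr 1
    simp only [List.length_cons]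
    omega

theorem refB_skip (pre l : List String) (i db : Nat) (n : Int) (hpre : "b" ∉ pre) :
    refB (pre ++ l) i db n = refB l (i + pre.length) db n := by
  induction pre generalizing i with
  | nil => simp
  | cons s t ih =>
    simp only [List.mem_cons, not_or] at hpre
    simp only [List.cons_append, refB, if_neg (Ne.symm hpre.1), ih _ hpre.2]
    congr 1
    simp only [List.length_cons]
    omega

theorem refD_none (l : List String) (i : Nat) (n : Int) (hl : "d" ∉ l) :
    refD l i n = [] := by
  have := refD_skip l [] i n hl
  simpa using this

theorem refB_none (l : List String) (i db : Nat) (n : Int) (hl : "b" ∉ l) :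
    refB l i db n = [] := by
  have := refB_skip l [] i db n hl
  simpa using this

-- A's loop computes the reference machine (induction on the fuel, which bounds the remaining length)
theorem aLoop_eq (mask : List String) (m index : Nat) (n : Int) (acc : List (Int × List Int))
    (hm : mask.length - index ≤ m) :
    aLoop mask m index n acc = acc ++ refD (mask.drop index) index n := by
  induction m generalizing index n acc with
  | zero =>
    have hge : mask.length ≤ index := by omega
    rw [aLoop, List.drop_eq_nil_of_le hge, refD]
    simp
  | succ m ih =>
    rw [aLoop]
    by_cases h : index < mask.length
    · rw [if_pos h]
      cases hd : PySem.List.index? (PySem.List.slice mask (some (index : Int)) none) "d" with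
      | none =>
        rw [PySem.List.slice_from_natCast, PySem.List.index?_eq_none_iff] at hd
        rw [refD_none _ _ _ hd, List.append_nil]
      | some j =>
        dsimp only
        rw [PySem.List.slice_from_natCast, PySem.List.index?_eq_some_iff] at hd
        obtain ⟨pre, suf, hsplit, hlen, hnd⟩ := hd
        have hdropdb : mask.drop (index + j) = "d" :: suf := by
          rw [← List.drop_drop, hsplit, ← hlen, List.drop_left]
        have hrefD : refD (mask.drop index) index n = refB suf (index + j + 1) (index + j) n := by
          rw [hsplit, refD_skip _ _ _ _ hnd, hlen, refD, if_pos rfl]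
        cases hb : PySem.List.index? (PySem.List.slice mask (some ((index + j : Nat) : Int)) none) "b" with
        | none =>
          dsimp only
          rw [PySem.List.slice_from_natCast, hdropdb, PySem.List.index?_eq_none_iff,
            List.mem_cons, not_or] at hb
          rw [hrefD, refB_none _ _ _ _ hb.2, List.append_nil]
        | some k =>
          rw [PySem.List.slice_from_natCast, hdropdb,
            PySem.List.index?_cons_of_ne (x := "d") (xs := suf) (v := "b") (by decide)] at hb
          cases hb' : PySem.List.index? suf "b" with
          | none => rw [hb'] at hb; simp at hb
          | some k' =>
            rw [hb'] at hb
            simp only [Option.map_some] at hb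
            obtain rfl : k = k' + 1 := (Option.some.inj hb).symm
            rw [PySem.List.index?_eq_some_iff] at hb'
            obtain ⟨pre2, suf2, hsplit2, hlen2, hnb⟩ := hb'
            have hdrop' : mask.drop (index + j + (k' + 1)) = "b" :: suf2 := by
              have heq : index + j + (k' + 1) = (index + j) + 1 + k' := by omega
              rw [heq, ← List.drop_drop, ← List.drop_drop, hdropdb]
              simp only [List.drop_one, List.tail_cons]
              rw [hsplit2, ← hlen2, List.drop_left]
            have hrefB : refB suf (index + j + 1) (index + j) n =
                (n, [((index + j : Nat) : Int), ((index + j + (k' + 1) : Nat) : Int) - 1]) ::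
                  refD suf2 (index + j + (k' + 1) + 1) (n + 1) := by
              rw [hsplit2, refB_skip _ _ _ _ _ hnb, hlen2, refB, if_pos rfl]
              have h1 : index + j + 1 + k' = index + j + (k' + 1) := by omega
              rw [h1]
            dsimp only
            rw [ih (index + j + (k' + 1)) (n + 1) _ (by omega), hrefD, hrefB, hdrop']
            rw [refD, if_neg (by decide)]
            simp [List.append_assoc]
    · rw [if_neg h]
      rw [List.drop_eq_nil_of_le (by omega), refD, List.append_nil]

-- B's fold computes the reference machine (both fold states at once, induction on the list)
theorem fold_eq (l : List String) (i : Nat) (n : Int) (acc : List (Int × List Int)) :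
    (((PySem.List.enumerate l (i : Int)).foldl altStep (none, n, acc)).2.2
        = acc ++ refD l i n)
    ∧ ∀ db : Nat,
      (((PySem.List.enumerate l (i : Int)).foldl altStep (some (db : Int), n, acc)).2.2
        = acc ++ refB l i db n) := by
  induction l generalizing i n acc with
  | nil => simp [PySem.List.enumerate_nil, refD, refB]
  | cons s t ih =>
    have hcast : (i : Int) + 1 = ((i + 1 : Nat) : Int) := by push_cast; ring
    constructor
    · rw [PySem.List.enumerate_cons, List.foldl_cons, refD]
      by_cases hs : s = "d"
      · rw [if_pos hs]
        simp only [altStep, hs, if_true]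
        rw [hcast]
        exact (ih (i + 1) n acc).2 i
      · rw [if_neg hs]
        simp only [altStep, if_neg hs]
        rw [hcast]
        exact (ih (i + 1) n acc).1
    · intro db
      rw [PySem.List.enumerate_cons, List.foldl_cons, refB]
      by_cases hs : s = "b"
      · rw [if_pos hs]
        simp only [altStep, hs, if_true]
        rw [hcast]
        have := (ih (i + 1) (n + 1) (acc ++ [(n, [(db : Int), (i : Int) - 1])])).1
        rw [this, List.append_assoc]
        simp
      · rw [if_neg hs]
        simp only [altStep, if_neg hs]
        rw [hcast]
        exact (ih (i + 1) n acc).2 db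

-- ===== VERDICT (by name: the statement is the Claim_ definition above) =====
theorem get_dot_info_spec : Claim_equal_get_dot_info := by
  intro mask _
  unfold Spec_get_dot_info get_dot_info get_dot_info_alt
  rw [aLoop_eq mask (mask.length + 1) 0 0 [] (by omega)]
  have := (fold_eq mask 0 0 []).1
  simp only [Nat.cast_zero] at this
  rw [this]
  simp
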